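-- pv_equiv track=rewrite | github.com/Mattiasg94/MasterThesis_Mattias | Mattias/python_proj/task1.py | getCombinationsOfJobs
-- ===== SOURCE A (Python) =====
-- def getCombinationsOfJobs(jobs):
--     lst_raw = [(x, y) for x in jobs for y in jobs]
--     lst = []
--     for el in lst_raw:
--         if not el[0] == el[1]:
--             lst.append(el)
--     lst = {tuple(sorted(item)) for item in lst}
--     return lst
-- ===== SOURCE B (Python) =====
-- def getCombinationsOfJobs(jobs):
--     # dedup first (first-occurrence order), then emit each unordered pair exactly once
--     rest = list(dict.fromkeys(jobs))
--     out = set()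
--     while rest:
--         a = rest.pop(0)
--         for b in rest:
--             out.add((a, b) if a <= b else (b, a))
--     return out
-- ===== Notes on version B (the rewrite author's own statement) =====
-- stated objective: simpler
-- what changed: Instead of generating all n^2 ordered pairs, filtering out equal ones and deduplicating into a set, B deduplicates the jobs once and emits each unordered pair exactly once with a pop-front/inner loop, normalizing with a min-max comparison.
import Mathlib
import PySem

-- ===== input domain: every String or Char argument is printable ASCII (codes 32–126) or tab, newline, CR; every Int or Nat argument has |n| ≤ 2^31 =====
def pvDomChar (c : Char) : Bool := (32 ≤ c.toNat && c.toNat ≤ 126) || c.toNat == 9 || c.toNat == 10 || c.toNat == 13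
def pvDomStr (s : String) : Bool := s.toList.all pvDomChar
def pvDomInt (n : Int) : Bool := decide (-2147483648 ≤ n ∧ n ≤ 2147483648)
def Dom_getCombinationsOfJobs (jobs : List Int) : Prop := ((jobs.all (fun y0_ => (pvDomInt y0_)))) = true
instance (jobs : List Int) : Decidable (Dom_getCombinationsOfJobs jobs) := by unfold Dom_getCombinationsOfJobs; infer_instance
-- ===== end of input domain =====

-- B deduplicates the jobs once and emits each unordered pair exactly once (simpler: no all-ordered-pairs pass, no equal-pair filter).

-- ===== PORT A =====
-- 'tuple(sorted(item))' on a 2-tuple is ported exactly as the min-max conditional.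
def getCombinationsOfJobs (jobs : List Int) : List (Int × Int) :=
  let lst_raw := jobs.flatMap (fun x => jobs.map (fun y => (x, y)))
  let lst := lst_raw.foldl (fun acc el => if !(el.1 == el.2) then acc ++ [el] else acc) []
  PySem.Set.ofList (lst.map (fun item => if item.1 ≤ item.2 then (item.1, item.2) else (item.2, item.1)))

-- ===== PORT B =====
-- '(a, b) if a <= b else (b, a)'
def pvNorm (a b : Int) : Int × Int := if a ≤ b then (a, b) else (b, a)

-- 'while rest: a = rest.pop(0); for b in rest: out.add(...)'
def pvPairLoop : List Int → PySem.Set (Int × Int) → PySem.Set (Int × Int)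
  | [], out => out
  | a :: rest, out => pvPairLoop rest (rest.foldl (fun s b => PySem.Set.add s (pvNorm a b)) out)

def getCombinationsOfJobs_alt (jobs : List Int) : List (Int × Int) :=
  pvPairLoop (PySem.List.dedup jobs) PySem.Set.empty

-- ===== PRECONDITION & SPEC =====
def Spec_getCombinationsOfJobs (jobs : List Int) (out : List (Int × Int)) : Prop := out = getCombinationsOfJobs_alt jobs
instance (jobs : List Int) (out : List (Int × Int)) : Decidable (Spec_getCombinationsOfJobs jobs out) := by unfold Spec_getCombinationsOfJobs; infer_instance

-- ===== CLAIM (what is proved, stated in full; the proofs are below) =====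
def Claim_equal_getCombinationsOfJobs : Prop := ∀ (jobs : List Int), Dom_getCombinationsOfJobs jobs → Spec_getCombinationsOfJobs jobs (getCombinationsOfJobs jobs)

-- ===== LEMMAS AND PROOFS =====

theorem pvNorm_comm (a b : Int) : pvNorm a b = pvNorm b a := by
  unfold pvNorm
  split_ifs with h1 h2 h2
  · have : a = b := le_antisymm h1 h2
    subst this; rfl
  · rfl
  · rfl
  · omega

-- ofList commutes with filter (first occurrences of a filtered list).
theorem pv_ofList_filter {α : Type} [BEq α] [LawfulBEq α] (p : α → Bool) (l : List α) :
    PySem.Set.ofList (l.filter p) = (PySem.Set.ofList l).filter p := by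
  induction l with
  | nil => rfl
  | cons x l ih =>
    by_cases hx : p x = true
    · rw [List.filter_cons_of_pos hx, PySem.Set.ofList_cons, PySem.Set.ofList_cons,
        List.filter_cons_of_pos hx, ih]
      simp only [PySem.Set.discard, List.filter_filter]
      exact congrArg _ (List.filter_congr (fun y _ => by rw [Bool.and_comm]))
    · rw [List.filter_cons_of_neg hx, PySem.Set.ofList_cons, List.filter_cons_of_neg hx, ih]
      simp only [PySem.Set.discard, List.filter_filter]
      exact List.filter_congr (fun y _ => by
        by_cases hyx : y = x
        · subst hyx; simp [hx]
        · simp [hyx])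

-- dropping the element x before mapping does not matter once images of x are filtered out
theorem pv_map_filter_post {α β : Type} [BEq α] [LawfulBEq α] [BEq β] [LawfulBEq β]
    (f : α → β) (x : α) (l : List α) :
    ((l.filter (fun y => !(y == x))).map f).filter (fun v => !(v == f x)) =
      (l.map f).filter (fun v => !(v == f x)) := by
  induction l with
  | nil => rfl
  | cons y l ih =>
    by_cases hyx : y = x
    · subst hyx
      simp only [List.filter_cons, List.map_cons, beq_self_eq_true, Bool.not_true]
      simpa using ih
    · by_cases hf : f y = f x
      · simp [hyx, hf, ih]
      · simp [hyx, hf, ih]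

-- ofList of a mapped list only depends on the deduped source
theorem pv_ofList_map_ofList {α β : Type} [BEq α] [LawfulBEq α] [BEq β] [LawfulBEq β]
    (f : α → β) (l : List α) :
    PySem.Set.ofList (l.map f) = PySem.Set.ofList ((PySem.Set.ofList l).map f) := by
  induction l with
  | nil => rfl
  | cons x l ih =>
    rw [List.map_cons, PySem.Set.ofList_cons, PySem.Set.ofList_cons, List.map_cons,
      PySem.Set.ofList_cons, ih]
    refine congrArg _ ?_
    simp only [PySem.Set.discard]
    rw [← pv_ofList_filter, ← pv_ofList_filter, pv_map_filter_post]

theorem pv_update_of_subset {α : Type} [BEq α] [LawfulBEq α] (s : PySem.Set α) (m : List α)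
    (h : ∀ y ∈ m, y ∈ s) : PySem.Set.update s m = s := by
  rw [PySem.Set.update_eq_append_filter]
  have : List.filter (fun y => !s.contains y) (PySem.Set.ofList m) = [] := by
    refine List.filter_eq_nil_iff.mpr (fun y hy => ?_)
    have : y ∈ m := (PySem.Set.mem_ofList _ _).mp hy
    simp [h y this]
  rw [this, List.append_nil]

theorem pv_ofList_flatMap_congr {α β : Type} [BEq α] [LawfulBEq α]
    (l : List β) (g g' : β → List α)
    (h : ∀ x ∈ l, PySem.Set.ofList (g x) = PySem.Set.ofList (g' x)) :
    PySem.Set.ofList (l.flatMap g) = PySem.Set.ofList (l.flatMap g') := by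
  induction l with
  | nil => rfl
  | cons x l ih =>
    rw [List.flatMap_cons, List.flatMap_cons, PySem.Set.ofList_append, PySem.Set.ofList_append,
      PySem.Set.update_eq_append_filter, PySem.Set.update_eq_append_filter,
      h x (List.mem_cons_self), ih (fun z hz => h z (List.mem_cons_of_mem _ hz))]

-- blocks of already-seen generators are absorbed: the flatMap may run over the deduped, unseen source
theorem pv_update_flatMap_dedup {α β : Type} [BEq α] [LawfulBEq α] [BEq β] [LawfulBEq β]
    (g : β → List α) (l : List β) (s : PySem.Set α) (seen : List β)
    (h : ∀ x ∈ seen, ∀ v ∈ g x, v ∈ s) :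
    PySem.Set.update s (l.flatMap g) =
      PySem.Set.update s (((PySem.Set.ofList l).filter (fun x => !(seen.contains x))).flatMap g) := by
  induction l generalizing s seen with
  | nil => rfl
  | cons x l ih =>
    rw [List.flatMap_cons, PySem.Set.ofList_cons]
    by_cases hx : x ∈ seen
    · have hsub : PySem.Set.update s (g x) = s := pv_update_of_subset s (g x) (h x hx)
      have : PySem.Set.update s (g x ++ l.flatMap g)
          = PySem.Set.update s (l.flatMap g) := by
        rw [PySem.Set.update_append, hsub]
      rw [this, ih s seen h]
      rw [List.filter_cons_of_neg (by simpa using hx)]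
      refine congrArg _ (congrArg (List.flatMap g) ?_)
      simp only [PySem.Set.discard, List.filter_filter]
      refine List.filter_congr (fun y _ => ?_)
      by_cases hyx : y = x
      · subst hyx; simpa using hx
      · simp [hyx]
    · rw [PySem.Set.update_append]
      have hcond : ∀ z ∈ (x :: seen), ∀ v ∈ g z, v ∈ PySem.Set.update s (g x) := by
        intro z hz v hv
        rcases List.mem_cons.mp hz with hz | hz
        · subst hz; exact (PySem.Set.mem_update _ _ _).mpr (Or.inr hv)
        · exact (PySem.Set.mem_update _ _ _).mpr (Or.inl (h z hz v hv))
      rw [ih (PySem.Set.update s (g x)) (x :: seen) hcond]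
      rw [List.filter_cons_of_pos (by simpa using hx), List.flatMap_cons, PySem.Set.update_append]
      refine congrArg _ (congrArg (List.flatMap g) ?_)
      simp only [PySem.Set.discard, List.filter_filter]
      refine List.filter_congr (fun y _ => ?_)
      by_cases hyx : y = x
      · subst hyx; simp
      · simp [hyx]

-- heads that are already in the accumulated set may be dropped from every block
theorem pv_drop_heads {α β : Type} [BEq α] [LawfulBEq α]
    (u : List β) (hd : β → α) (inner : β → List α) (s : PySem.Set α)
    (h : ∀ x ∈ u, hd x ∈ s) :
    PySem.Set.update s (u.flatMap (fun x => hd x :: inner x)) =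
      PySem.Set.update s (u.flatMap inner) := by
  induction u generalizing s with
  | nil => rfl
  | cons x u ih =>
    rw [List.flatMap_cons, List.flatMap_cons, PySem.Set.update_append, PySem.Set.update_append]
    have hcons : PySem.Set.update s (hd x :: inner x) = PySem.Set.update s (inner x) := by
      show PySem.Set.update (PySem.Set.add s (hd x)) (inner x) = _
      rw [PySem.Set.add_of_mem (h x List.mem_cons_self)]
    rw [hcons]
    exact ih _ (fun z hz => (PySem.Set.mem_update _ _ _).mpr (Or.inl (h z (List.mem_cons_of_mem _ hz))))

-- the inner generator of A, over source list l
def pvGen (l : List Int) (x : Int) : List (Int × Int) :=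
  (l.filter (fun y => !(x == y))).map (pvNorm x)

-- B's loop computes, over a duplicate-free list, exactly A's generator run over that list
theorem pv_loop_eq (u : List Int) (s : PySem.Set (Int × Int)) (hu : u.Nodup) :
    pvPairLoop u s = PySem.Set.update s (u.flatMap (pvGen u)) := by
  induction u generalizing s with
  | nil => rfl
  | cons a u ih =>
    have hau : a ∉ u := (List.nodup_cons.mp hu).1
    have hu' : u.Nodup := (List.nodup_cons.mp hu).2
    show pvPairLoop u (u.foldl (fun s b => PySem.Set.add s (pvNorm a b)) s) = _
    rw [← PySem.Set.update_map_eq_foldl_add, ih _ hu']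
    have hGa : pvGen (a :: u) a = u.map (pvNorm a) := by
      unfold pvGen
      rw [List.filter_cons_of_neg (by simp)]
      refine congrArg _ (List.filter_eq_self.mpr (fun y hy => ?_))
      simpa using fun h : a = y => hau (h ▸ hy)
    rw [List.flatMap_cons, hGa, PySem.Set.update_append]
    have hblocks : u.flatMap (pvGen (a :: u)) = u.flatMap (fun x => pvNorm x a :: pvGen u x) := by
      refine List.flatMap_congr (fun x hx => ?_)
      unfold pvGen
      rw [List.filter_cons_of_pos (by simpa using fun h : x = a => hau (h ▸ hx)), List.map_cons]
    rw [hblocks, pv_drop_heads]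
    intro x hx
    rw [pvNorm_comm]
    exact (PySem.Set.mem_update _ _ _).mpr (Or.inr (List.mem_map_of_mem hx))

-- A's result in flatMap-of-generators form
theorem pv_A_eq (jobs : List Int) :
    getCombinationsOfJobs jobs = PySem.Set.ofList (jobs.flatMap (pvGen jobs)) := by
  show PySem.Set.ofList
      (((jobs.flatMap (fun x => jobs.map (fun y => (x, y)))).foldl
          (fun acc el => if !(el.1 == el.2) then acc ++ [el] else acc) []).map
        (fun item => if item.1 ≤ item.2 then (item.1, item.2) else (item.2, item.1))) = _
  rw [PySem.List.foldl_append_if_eq_filter (fun el : Int × Int => !(el.1 == el.2))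
      (jobs.flatMap (fun x => jobs.map (fun y => (x, y)))) [], List.nil_append]
  refine congrArg _ ?_
  rw [List.filter_flatMap, List.map_flatMap]
  refine List.flatMap_congr (fun x _ => ?_)
  rw [List.filter_map, List.map_map]
  rfl

-- ===== VERDICT (by name: the statement is the Claim_ definition above) =====
theorem getCombinationsOfJobs_spec : Claim_equal_getCombinationsOfJobs := by
  intro jobs _
  show getCombinationsOfJobs jobs = getCombinationsOfJobs_alt jobs
  rw [pv_A_eq]
  unfold getCombinationsOfJobs_alt
  rw [PySem.List.dedup_eq_ofList,
    pv_loop_eq (PySem.Set.ofList jobs) PySem.Set.empty (PySem.Set.nodup_ofList jobs)]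
  have h1 : PySem.Set.ofList (jobs.flatMap (pvGen jobs))
      = PySem.Set.update PySem.Set.empty (jobs.flatMap (pvGen jobs)) := rfl
  rw [h1, pv_update_flatMap_dedup (pvGen jobs) jobs PySem.Set.empty [] (by simp)]
  have h2 : (PySem.Set.ofList jobs).filter (fun x => !(([] : List Int).contains x))
      = PySem.Set.ofList jobs := List.filter_eq_self.mpr (by simp)
  rw [h2]
  show PySem.Set.ofList ((PySem.Set.ofList jobs).flatMap (pvGen jobs))
      = PySem.Set.ofList ((PySem.Set.ofList jobs).flatMap (pvGen (PySem.Set.ofList jobs)))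
  refine pv_ofList_flatMap_congr _ _ _ (fun x _ => ?_)
  unfold pvGen
  rw [pv_ofList_map_ofList, pv_ofList_filter]
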